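-- pv_equiv track=rewrite | github.com/homosapien-lcy/turbo_write_app_and_database | turbo_write/server/pythonSubServer/python_utils/tagAnalysisUtils.py | extractNoun
-- ===== SOURCE A (Python) =====
-- def extractNoun(each_list):
--     rl = list(reversed(each_list))
--     # no matter the property of the last word
--     # add it to the noun
--     '''
--     since all words before 'IN' and 'CC' are
--     indeed nouns, their other assignment are
--     bug of the tagger
--     '''
--     noun = rl[0][0]
--     for word in rl[1:]:
--         # for each word of 'NN.*' add it to the noun
--         if word[1][:2] in ['NN', 'JJ']:
--             noun = word[0] + ' ' + noun
--         # else, stop the extraction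
--         else:
--             break
--
--     return noun
-- ===== SOURCE B (Python) =====
-- def extractNoun(each_list):
--     # last word is always included (IndexError on empty input, like A)
--     noun = each_list[-1][0]
--     # find the cutoff: start of the contiguous trailing run of NN/JJ-tagged words
--     start = len(each_list) - 1
--     for i in range(len(each_list) - 2, -1, -1):
--         if each_list[i][1][:2] in ('NN', 'JJ'):
--             start = i
--         else:
--             break
--     return ' '.join(w[0] for w in each_list[start:])
-- ===== Notes on version B (the rewrite author's own statement) =====
-- stated objective: alternative
-- what changed: B first computes a cutoff index by scanning indices backwards for the end of the contiguous NN/JJ-tagged run, then builds the phrase in a single ' '.join over the slice, instead of A's reversing the list and accumulating the phrase string by repeated prepending inside the scan.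
import Mathlib
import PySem

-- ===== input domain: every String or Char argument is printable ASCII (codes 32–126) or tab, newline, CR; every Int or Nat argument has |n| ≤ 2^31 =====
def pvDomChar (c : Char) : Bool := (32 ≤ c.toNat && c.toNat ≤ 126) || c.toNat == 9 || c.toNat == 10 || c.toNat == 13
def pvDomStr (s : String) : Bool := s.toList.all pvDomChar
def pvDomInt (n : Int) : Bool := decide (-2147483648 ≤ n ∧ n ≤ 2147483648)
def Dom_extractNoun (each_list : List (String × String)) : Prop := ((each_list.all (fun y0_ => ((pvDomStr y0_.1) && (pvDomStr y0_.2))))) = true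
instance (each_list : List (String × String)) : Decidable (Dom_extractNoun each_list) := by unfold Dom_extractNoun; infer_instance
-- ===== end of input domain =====

-- B computes a cutoff index by scanning indices backwards, then joins the slice in one
-- pass, instead of A's accumulation of the phrase string while scanning (objective: alternative).
set_option maxHeartbeats 1000000


-- ===== PORT A =====
-- word[1][:2] in ['NN', 'JJ']
def tagNNJJ (t : String) : Bool :=
  PySem.Str.slice t none (some 2) == "NN" || PySem.Str.slice t none (some 2) == "JJ"

-- the 'for word in rl[1:]' loop with its break
def extractNounLoop : List (String × String) → String → String
  | [], noun => noun
  | w :: ws, noun =>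
    if tagNNJJ w.2 then extractNounLoop ws (w.1 ++ " " ++ noun) else noun

def extractNoun (each_list : List (String × String)) : String :=
  match each_list.reverse with
  | [] => ""          -- rl[0] raises IndexError in Python; excluded by Pre_
  | w :: rest => extractNounLoop rest w.1

-- ===== PORT B =====
-- the index loop: walk i downwards, 'start = i' while the tag matches, break otherwise
def findStart (each_list : List (String × String)) : List Int → Int → Int
  | [], start => start
  | i :: is, start =>
    if tagNNJJ (PySem.List.pyGetD each_list i ("", "")).2 then findStart each_list is i
    else start

def extractNoun_alt (each_list : List (String × String)) : String :=
  match each_list with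
  | [] => ""          -- each_list[-1] raises IndexError in Python; excluded by Pre_
  | _ :: _ =>
    let n : Int := each_list.length
    let start := findStart each_list (PySem.List.pyRange (n - 2) (-1) (-1)) (n - 1)
    PySem.Str.join " " ((PySem.List.slice each_list (some start) none).map (·.1))

-- ===== PRECONDITION & SPEC =====
-- Python A raises IndexError on the empty list (rl[0]); excluded.
def Pre_extractNoun (each_list : List (String × String)) : Prop := each_list ≠ []
instance (each_list : List (String × String)) : Decidable (Pre_extractNoun each_list) := by unfold Pre_extractNoun; infer_instance
def pvWitness_extractNoun : (List (String × String)) := [("big", "JJ"), ("dog", "NN")]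

def Spec_extractNoun (each_list : List (String × String)) (out : String) : Prop := out = extractNoun_alt each_list
instance (each_list : List (String × String)) (out : String) : Decidable (Spec_extractNoun each_list out) := by unfold Spec_extractNoun; infer_instance

-- ===== CLAIM (what is proved, stated in full; the proofs are below) =====
def Claim_equal_extractNoun : Prop := ∀ (each_list : List (String × String)), Dom_extractNoun each_list → Pre_extractNoun each_list → Spec_extractNoun each_list (extractNoun each_list)

-- ===== LEMMAS AND PROOFS =====

-- join over a nonempty list, cons form
theorem chars_join_cons (sep p : List Char) (l : List (List Char)) (h : l ≠ []) :
    PySem.Chars.join sep (p :: l) = p ++ sep ++ PySem.Chars.join sep l := by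
  cases l with
  | nil => exact absurd rfl h
  | cons q r => exact PySem.Chars.join_cons_cons sep p q r

-- fusing the last two pieces with the separator in between does not change the join
theorem chars_join_fuse (sep : List Char) (xs : List (List Char)) (a b : List Char) :
    PySem.Chars.join sep (xs ++ [a, b]) = PySem.Chars.join sep (xs ++ [a ++ sep ++ b]) := by
  induction xs with
  | nil =>
    simp only [List.nil_append]
    rw [PySem.Chars.join_cons_cons, PySem.Chars.join_singleton, PySem.Chars.join_singleton]
  | cons x xs ih =>
    simp only [List.cons_append]
    rw [chars_join_cons sep x _ (by simp), chars_join_cons sep x _ (by simp), ih]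

-- A's loop equals the join of the reversed matching prefix, on char lists
theorem loop_toList (rest : List (String × String)) (noun : String) :
    (extractNounLoop rest noun).toList =
      PySem.Chars.join " ".toList
        ((((rest.takeWhile (fun w => tagNNJJ w.2)).map (·.1.toList)).reverse) ++ [noun.toList]) := by
  induction rest generalizing noun with
  | nil => simp [extractNounLoop, PySem.Chars.join_singleton]
  | cons w ws ih =>
    by_cases h : tagNNJJ w.2
    · rw [show extractNounLoop (w :: ws) noun = extractNounLoop ws (w.1 ++ " " ++ noun) from by
        simp [extractNounLoop, h]]
      rw [ih]
      simp only [List.takeWhile_cons, h, if_true]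
      simp only [List.map_cons, List.reverse_cons, List.append_assoc, List.cons_append,
        List.nil_append]
      rw [chars_join_fuse]
      simp
    · rw [show extractNounLoop (w :: ws) noun = noun from by simp [extractNounLoop, h]]
      simp [h, PySem.Chars.join_singleton]

-- B's index loop computes length-minus-run-length, stated against any list r that
-- mirrors each_list at indices i, i-1, …
theorem findStart_eq (l : List (String × String)) (r : List (String × String)) :
    ∀ (i : Int), i + 1 = r.length →
      (∀ t : Nat, t < r.length → PySem.List.pyGetD l (i - t) ("", "") = r.getD t ("", "")) →
      findStart l (PySem.List.pyRange i (-1) (-1)) (i + 1)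
        = i + 1 - ((r.takeWhile (fun w => tagNNJJ w.2)).length : Int) := by
  induction r with
  | nil =>
    intro i hi _
    rw [PySem.List.pyRange_neg_one_eq_nil (by simp at hi; omega)]
    simp [findStart]
  | cons w ws ih =>
    intro i hi hidx
    have hi' : i = (ws.length : Int) := by simp at hi; omega
    rw [PySem.List.pyRange_neg_one_cons (by omega)]
    have h0 := hidx 0 (by simp)
    simp only [Nat.cast_zero, sub_zero, List.getD_cons_zero] at h0
    simp only [findStart, h0]
    by_cases h : tagNNJJ w.2
    · rw [if_pos h]
      have key : findStart l (PySem.List.pyRange (i - 1) (-1) (-1)) ((i - 1) + 1)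
          = (i - 1) + 1 - ((ws.takeWhile (fun w => tagNNJJ w.2)).length : Int) := by
        apply ih
        · simp at hi ⊢; omega
        · intro t ht
          have := hidx (t + 1) (by simpa using Nat.succ_lt_succ ht)
          simp only [List.getD_cons_succ] at this
          rw [← this]
          congr 1
          push_cast
          ring
      rw [show (i - 1) + 1 = i from by ring] at key
      rw [key]
      simp only [List.takeWhile_cons, h, if_true]
      simp
    · rw [if_neg h]
      simp [h]

-- drop of the non-matching part of the reverse is the reverse of the matching prefix
theorem drop_reverse_takeWhile {α : Type} (p : α → Bool) (y : List α) :
    y.reverse.drop (y.length - (y.takeWhile p).length) = (y.takeWhile p).reverse := by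
  set a := y.takeWhile p with ha
  set b := y.dropWhile p with hb
  have hab : a ++ b = y := List.takeWhile_append_dropWhile
  rw [← hab, List.reverse_append]
  have hlen : (a ++ b).length - a.length = b.reverse.length := by simp
  rw [hlen, List.drop_left]

-- ===== VERDICT (by name: the statement is the Claim_ definition above) =====
theorem extractNoun_spec : Claim_equal_extractNoun := by
  intro each_list _ hpre
  unfold Spec_extractNoun
  -- split off the last element
  obtain ⟨init, last, rfl⟩ : ∃ init last, each_list = init ++ [last] := by
    cases h : each_list.reverse with
    | nil => simp at h; exact absurd h hpre
    | cons w rest =>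
      exact ⟨rest.reverse, w, by rw [← List.reverse_reverse each_list, h]; simp⟩
  have hm : (init ++ [last]).length = init.length + 1 := by simp
  set m := init.length with hmdef
  set k := ((init.reverse.takeWhile (fun w => tagNNJJ w.2)).length) with hk
  have hkm : k ≤ m := by
    have := (List.takeWhile_prefix (p := fun w => tagNNJJ w.2) (l := init.reverse)).length_le
    simpa [hk, hmdef] using this
  -- A's value
  have hA : extractNoun (init ++ [last]) = extractNounLoop init.reverse last.1 := by
    unfold extractNoun
    rw [show (init ++ [last]).reverse = last :: init.reverse from by simp]
  -- B's start index
  have hstart : findStart (init ++ [last])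
      (PySem.List.pyRange (((init ++ [last]).length : Int) - 2) (-1) (-1))
      (((init ++ [last]).length : Int) - 1) = (m : Int) - k := by
    have heq : (((init ++ [last]).length : Int) - 2) + 1 = (init.reverse.length : Int) := by
      rw [hm]; push_cast; simp [hmdef]; ring
    have hidx : ∀ t : Nat, t < init.reverse.length →
        PySem.List.pyGetD (init ++ [last]) ((((init ++ [last]).length : Int) - 2) - t) ("", "")
          = init.reverse.getD t ("", "") := by
      intro t ht
      simp only [List.length_reverse] at ht
      have h0 : (0 : Int) ≤ ((init ++ [last]).length : Int) - 2 - t := by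
        rw [hm]; push_cast; omega
      rw [PySem.List.pyGetD_of_nonneg _ _ h0]
      have htn : ((((init ++ [last]).length : Int) - 2) - t).toNat = m - 1 - t := by
        rw [hm]; omega
      rw [htn]
      rw [List.getD_eq_getElem?_getD, List.getD_eq_getElem?_getD]
      rw [List.getElem?_append_left (by omega)]
      rw [List.getElem?_reverse ht]
    have := findStart_eq (init ++ [last]) init.reverse
      ((((init ++ [last]).length : Int) - 2)) heq hidx
    rw [show ((((init ++ [last]).length : Int) - 2) + 1) = ((init ++ [last]).length : Int) - 1
      from by ring] at this
    rw [this, ← hk, hm]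
    push_cast
    simp [hmdef]
  have hB : extractNoun_alt (init ++ [last]) =
      PySem.Str.join " " ((PySem.List.slice (init ++ [last]) (some ((m : Int) - k)) none).map (·.1)) := by
    unfold extractNoun_alt
    cases hcase : init ++ [last] with
    | nil => simp at hcase
    | cons a as =>
      simp only []
      rw [← hcase, hstart]
  rw [hA, hB]
  -- reduce both sides to char lists
  apply String.toList_inj.mp
  rw [loop_toList]
  have hslice : PySem.List.slice (init ++ [last]) (some ((m : Int) - k)) none
      = (init.reverse.takeWhile (fun w => tagNNJJ w.2)).reverse ++ [last] := by
    rw [show ((m : Int) - k) = ((m - k : Nat) : Int) from by omega]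
    rw [PySem.List.slice_from _ (by positivity)]
    rw [Int.toNat_natCast]
    rw [List.drop_append_of_le_length (by omega)]
    congr 1
    · have := drop_reverse_takeWhile (fun w => tagNNJJ w.2) init.reverse
      simpa [hk, hmdef] using this
  rw [hslice]
  simp only [PySem.Str.join, String.toList_ofList]
  congr 1
  simp
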